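-- pv_equiv track=rewrite | github.com/hydropix/TranslateBookWithLLM | src/core/epub/html_chunker.py | _is_block_opening_tag
-- ===== SOURCE A (Python) =====
-- def _is_block_opening_tag(tag: str) -> bool:
--     """Check if the tag is a block opening tag (<p>, <div>, etc.)"""
--     block_tags = {'p', 'div', 'h1', 'h2', 'h3', 'h4', 'h5', 'h6',
--                   'blockquote', 'section', 'article', 'li', 'tr', 'td', 'th'}
--     tag_lower = tag.lower()
--     for bt in block_tags:
--         if f'<{bt}>' in tag_lower or f'<{bt} ' in tag_lower:
--             return True
--     return False
-- ===== SOURCE B (Python) =====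
-- _BLOCK_TAGS = ('blockquote', 'section', 'article', 'h1', 'h2', 'h3', 'h4',
--                'h5', 'h6', 'div', 'td', 'th', 'tr', 'li', 'p')
--
--
-- def _is_block_opening_tag(tag: str) -> bool:
--     """Check if the tag is a block opening tag (<p>, <div>, etc.)"""
--     s = tag.lower()
--     n = len(s)
--     for i in range(n):
--         if s[i] == '<':
--             for bt in _BLOCK_TAGS:
--                 j = i + 1 + len(bt)
--                 if j < n and s.startswith(bt, i + 1) and (s[j] == ' ' or s[j] == '>'):
--                     return True
--     return False
-- ===== Notes on version B (the rewrite author's own statement) =====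
-- stated objective: alternative
-- what changed: A runs 15 independent substring searches over the lowered string (two per tag name); B lowers once and makes a single left-to-right scan, testing the tag names only at opening-bracket positions (a prefix match at an offset plus a terminator check), so the string is traversed once.
import Mathlib
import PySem

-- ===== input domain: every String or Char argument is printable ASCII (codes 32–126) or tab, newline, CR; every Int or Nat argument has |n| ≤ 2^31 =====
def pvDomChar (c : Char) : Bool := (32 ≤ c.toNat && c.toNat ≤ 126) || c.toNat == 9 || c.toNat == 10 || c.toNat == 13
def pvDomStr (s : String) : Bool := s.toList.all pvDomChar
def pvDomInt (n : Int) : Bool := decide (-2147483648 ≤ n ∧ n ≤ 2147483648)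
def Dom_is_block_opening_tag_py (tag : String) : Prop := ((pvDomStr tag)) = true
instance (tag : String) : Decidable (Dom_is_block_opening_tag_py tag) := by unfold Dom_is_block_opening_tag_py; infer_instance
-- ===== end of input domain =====

-- B replaces A's 15 separate per-tag substring searches by ONE left-to-right
-- scan of the lowered string that tests candidate tags only at opening-bracket positions (objective: alternative).

-- ===== PORT A =====
-- Python set literal: iteration order is arbitrary; the result is an existence test, so the
-- written order (deduplicated) is a faithful port.
def pvTagsA : List (List Char) :=
  (PySem.Set.ofList ["p", "div", "h1", "h2", "h3", "h4", "h5", "h6",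
                     "blockquote", "section", "article", "li", "tr", "td", "th"]).map String.toList

def is_block_opening_tag_py (tag : String) : Bool :=
  let tagLower := PySem.Chars.lower tag.toList
  pvTagsA.any (fun bt =>
    PySem.Chars.isIn ('<' :: bt ++ ['>']) tagLower || PySem.Chars.isIn ('<' :: bt ++ [' ']) tagLower)

-- ===== PORT B =====
def pvTagsB : List (List Char) :=
  ["blockquote", "section", "article", "h1", "h2", "h3", "h4",
   "h5", "h6", "div", "td", "th", "tr", "li", "p"].map String.toList

-- s.startswith(bt, i+1) and (s[j] == ' ' or s[j] == '>'), rest = s[i+1:]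
def pvMatchAfterLt (bt rest : List Char) : Bool :=
  bt.isPrefixOf rest &&
    match rest.drop bt.length with
    | c :: _ => c == ' ' || c == '>'
    | [] => false

-- the outer 'for i in range(n): if s[i] == '<'' loop, as recursion on the suffix
def pvScanB (s : List Char) : Bool :=
  match s with
  | [] => false
  | c :: rest => (c == '<' && pvTagsB.any (fun bt => pvMatchAfterLt bt rest)) || pvScanB rest

def is_block_opening_tag_py_alt (tag : String) : Bool :=
  pvScanB (PySem.Chars.lower tag.toList)

-- ===== PRECONDITION & SPEC =====
def Spec_is_block_opening_tag_py (tag : String) (out : Bool) : Prop := out = is_block_opening_tag_py_alt tag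
instance (tag : String) (out : Bool) : Decidable (Spec_is_block_opening_tag_py tag out) := by unfold Spec_is_block_opening_tag_py; infer_instance

-- ===== CLAIM (what is proved, stated in full; the proofs are below) =====
def Claim_equal_is_block_opening_tag_py : Prop := ∀ (tag : String), Dom_is_block_opening_tag_py tag → Spec_is_block_opening_tag_py tag (is_block_opening_tag_py tag)

-- ===== LEMMAS AND PROOFS =====

lemma pvMatch_step (b : Char) (bs : List Char) (c : Char) (r : List Char) :
    pvMatchAfterLt (b :: bs) (c :: r) = ((b == c) && pvMatchAfterLt bs r) := by
  simp [pvMatchAfterLt, List.isPrefixOf, Bool.and_assoc]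

lemma pvMatch_nil_cons (c : Char) (r : List Char) :
    pvMatchAfterLt [] (c :: r) = (c == ' ' || c == '>') := rfl

lemma pvMatch_iff (bt rest : List Char) :
    pvMatchAfterLt bt rest = true ↔ (bt ++ ['>'] <+: rest ∨ bt ++ [' '] <+: rest) := by
  induction bt generalizing rest with
  | nil =>
    cases rest with
    | nil => simp [pvMatchAfterLt]
    | cons c r =>
      rw [pvMatch_nil_cons]
      simp only [List.nil_append, Bool.or_eq_true, beq_iff_eq, List.cons_prefix_cons,
        List.nil_prefix, and_true]
      tauto
  | cons b bs ih =>
    cases rest with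
    | nil => simp [pvMatchAfterLt]
    | cons c r =>
      rw [pvMatch_step]
      simp only [Bool.and_eq_true, beq_iff_eq, ih, List.cons_append, List.cons_prefix_cons]
      tauto

lemma pvScan_iff (s : List Char) :
    pvScanB s = true ↔ ∃ bt ∈ pvTagsB, (('<' :: (bt ++ ['>'])) <:+: s ∨ ('<' :: (bt ++ [' '])) <:+: s) := by
  induction s with
  | nil => simp [pvScanB]
  | cons c rest ih =>
    rw [pvScanB]
    simp only [Bool.or_eq_true, Bool.and_eq_true, beq_iff_eq, List.any_eq_true, pvMatch_iff, ih,
      List.infix_cons_iff, List.cons_prefix_cons]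
    constructor
    · rintro (⟨rfl, bt, hbt, (h | h)⟩ | ⟨bt, hbt, (h | h)⟩)
      · exact ⟨bt, hbt, Or.inl (Or.inl ⟨rfl, h⟩)⟩
      · exact ⟨bt, hbt, Or.inr (Or.inl ⟨rfl, h⟩)⟩
      · exact ⟨bt, hbt, Or.inl (Or.inr h)⟩
      · exact ⟨bt, hbt, Or.inr (Or.inr h)⟩
    · rintro ⟨bt, hbt, (⟨rfl, h⟩ | h) | (⟨rfl, h⟩ | h)⟩
      · exact Or.inl ⟨rfl, bt, hbt, Or.inl h⟩
      · exact Or.inr ⟨bt, hbt, Or.inl h⟩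
      · exact Or.inl ⟨rfl, bt, hbt, Or.inr h⟩
      · exact Or.inr ⟨bt, hbt, Or.inr h⟩

lemma pvTags_perm : pvTagsA.Perm pvTagsB := by decide

lemma pvTags_mem (bt : List Char) : bt ∈ pvTagsA ↔ bt ∈ pvTagsB := pvTags_perm.mem_iff

-- ===== VERDICT (by name: the statement is the Claim_ definition above) =====
theorem is_block_opening_tag_py_spec : Claim_equal_is_block_opening_tag_py := by
  intro tag _
  unfold Spec_is_block_opening_tag_py is_block_opening_tag_py is_block_opening_tag_py_alt
  rw [Bool.eq_iff_iff]
  simp only [List.any_eq_true, Bool.or_eq_true, PySem.Chars.isIn_iff_infix, pvScan_iff]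
  constructor
  · rintro ⟨bt, hbt, h⟩; exact ⟨bt, (pvTags_mem bt).mp hbt, by simpa using h⟩
  · rintro ⟨bt, hbt, h⟩; exact ⟨bt, (pvTags_mem bt).mpr hbt, by simpa using h⟩
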